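-- pv_equiv track=rewrite | github.com/JJLLWW/google_code_jam | 2018_qualification_round.py | get_last_S_block_idx
-- ===== SOURCE A (Python) =====
-- def get_last_S_block_idx(prog):
--     # watch out if there are no S's in the program.
--     if prog.count('S') == 0:
--         raise ValueError("get_last_S_block_idx called with prog with no S's")
--     i = len(prog) - 1
--     while True:
--         if prog[i] == 'S':
--             while True:
--                 # i < 0 to handle if just a block of S's
--                 if i < 0 or prog[i] == 'C':
--                     return i+1
--                 i -= 1
--         i -= 1
-- ===== SOURCE B (Python) =====
-- def get_last_S_block_idx(prog):
--     # single forward pass: block_start tracks index after the most recent 'C';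
--     # result records block_start at the most recent 'S'.
--     block_start = 0
--     result = None
--     for i, ch in enumerate(prog):
--         if ch == 'C':
--             block_start = i + 1
--         elif ch == 'S':
--             result = block_start
--     if result is None:
--         raise ValueError("get_last_S_block_idx called with prog with no S's")
--     return result
-- ===== Notes on version B (the rewrite author's own statement) =====
-- stated objective: simpler
-- what changed: Replaced the backward nested scan (find last 'S', then scan back to the previous 'C') with one forward pass that threads a block_start accumulator and records it at each 'S'.
import Mathlib
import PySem

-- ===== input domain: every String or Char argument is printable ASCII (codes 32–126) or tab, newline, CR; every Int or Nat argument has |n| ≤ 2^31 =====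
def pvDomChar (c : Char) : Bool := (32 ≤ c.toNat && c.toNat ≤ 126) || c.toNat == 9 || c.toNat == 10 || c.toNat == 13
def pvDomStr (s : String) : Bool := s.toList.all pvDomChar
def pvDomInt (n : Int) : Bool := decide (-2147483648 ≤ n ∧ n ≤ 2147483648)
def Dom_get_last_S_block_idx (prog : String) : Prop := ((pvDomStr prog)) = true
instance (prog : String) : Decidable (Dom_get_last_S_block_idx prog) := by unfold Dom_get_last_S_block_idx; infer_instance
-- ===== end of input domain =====

-- B replaces A's backward nested scan (locate last 'S', scan back to the previous 'C')
-- with a single forward pass threading a block_start accumulator (objective: simpler).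
-- Both Pythons raise ValueError when prog has no 'S'; Pre_ excludes exactly those inputs.


-- ===== PORT A =====
-- inner while loop of A: from index n, walk left until 'C' (return index+1) or fall off the front (return 0)
def pvAInner (cs : List Char) : Nat → Int
  | 0 => if cs.getD 0 ' ' = 'C' then 1 else 0
  | n+1 => if cs.getD (n+1) ' ' = 'C' then (n : Int) + 2 else pvAInner cs n

-- outer while loop of A: walk left from index n looking for an 'S' (guaranteed to exist under Pre_)
def pvAOuter (cs : List Char) : Nat → Int
  | 0 => if cs.getD 0 ' ' = 'S' then pvAInner cs 0 else 0
  | n+1 => if cs.getD (n+1) ' ' = 'S' then pvAInner cs (n+1) else pvAOuter cs n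

def get_last_S_block_idx (prog : String) : Int :=
  let cs := prog.toList
  if cs.count 'S' = 0 then 0  -- Python raises ValueError here; excluded by Pre_
  else pvAOuter cs (cs.length - 1)

-- ===== PORT B =====
-- B's for-loop: state = (block_start, result), i the running index
def pvAltGo (i : Int) (s : Int × Option Int) : List Char → Int × Option Int
  | [] => s
  | c :: t =>
      pvAltGo (i + 1)
        (if c = 'C' then (i + 1, s.2) else if c = 'S' then (s.1, some s.1) else s) t

def get_last_S_block_idx_alt (prog : String) : Int :=
  ((pvAltGo 0 (0, none) prog.toList).2).getD 0  -- none = Python's ValueError; excluded by Pre_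

-- ===== PRECONDITION & SPEC =====
-- Pre_ excludes exactly the inputs with no 'S', on which both Pythons raise ValueError.
def Pre_get_last_S_block_idx (prog : String) : Prop := 'S' ∈ prog.toList
instance (prog : String) : Decidable (Pre_get_last_S_block_idx prog) := by
  unfold Pre_get_last_S_block_idx; infer_instance
def pvWitness_get_last_S_block_idx : String := "CSS"

def Spec_get_last_S_block_idx (prog : String) (out : Int) : Prop := out = get_last_S_block_idx_alt prog
instance (prog : String) (out : Int) : Decidable (Spec_get_last_S_block_idx prog out) := by unfold Spec_get_last_S_block_idx; infer_instance

-- ===== CLAIM (what is proved, stated in full; the proofs are below) =====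
def Claim_equal_get_last_S_block_idx : Prop := ∀ (prog : String), Dom_get_last_S_block_idx prog → Pre_get_last_S_block_idx prog → Spec_get_last_S_block_idx prog (get_last_S_block_idx prog)

-- ===== LEMMAS AND PROOFS =====

theorem pv_getD_lt (l : List Char) (d : Char) (n : Nat) (h : n < l.length) :
    (l ++ [d]).getD n ' ' = l.getD n ' ' := by
  simp [List.getD_eq_getElem?_getD, List.getElem?_append_left h]

theorem pv_getD_last (m : List Char) (d : Char) :
    (m ++ [d]).getD m.length ' ' = d := by
  simp [List.getD_eq_getElem?_getD]

theorem pvAltGo_append (l : List Char) (i : Int) (s : Int × Option Int) (c : Char) :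
    pvAltGo i s (l ++ [c]) =
      (let s' := pvAltGo i s l
       if c = 'C' then (i + l.length + 1, s'.2)
       else if c = 'S' then (s'.1, some s'.1) else s') := by
  induction l generalizing i s with
  | nil => simp [pvAltGo]
  | cons h t ih =>
      simp only [List.cons_append, pvAltGo, ih]
      split_ifs <;> simp <;> ring_nf

theorem pvAInner_stable (l : List Char) (d : Char) :
    ∀ n, n < l.length → pvAInner (l ++ [d]) n = pvAInner l n := by
  intro n
  induction n with
  | zero => intro h; simp only [pvAInner, pv_getD_lt l d 0 h]
  | succ k ih =>
      intro h
      simp only [pvAInner, pv_getD_lt l d (k+1) h]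
      split_ifs with hc
      · rfl
      · exact ih (by omega)

theorem pvAOuter_stable (l : List Char) (d : Char) :
    ∀ n, n < l.length → pvAOuter (l ++ [d]) n = pvAOuter l n := by
  intro n
  induction n with
  | zero =>
      intro h
      simp only [pvAOuter, pv_getD_lt l d 0 h, pvAInner_stable l d 0 h]
  | succ k ih =>
      intro h
      simp only [pvAOuter, pv_getD_lt l d (k+1) h]
      split_ifs with hs
      · exact pvAInner_stable l d _ h
      · exact ih (by omega)

theorem pvAInner_bs :
    ∀ l : List Char, l ≠ [] →
      pvAInner l (l.length - 1) = (pvAltGo 0 (0, none) l).1 := by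
  intro l
  induction l using List.reverseRecOn with
  | nil => intro h; exact absurd rfl h
  | append_singleton m d ih =>
      intro _
      rw [pvAltGo_append]
      rcases m with _ | ⟨a, t⟩
      · by_cases hc : d = 'C' <;> by_cases hs : d = 'S' <;>
          simp [pvAInner, pvAltGo, hc, hs]
      · have hlen : ((a :: t) ++ [d]).length - 1 = t.length + 1 := by simp
        rw [hlen]
        have hget := pv_getD_last (a :: t) d
        simp only [List.length_cons] at hget
        simp only [pvAInner, hget]
        by_cases hc : d = 'C'
        · simp [hc]; ring
        · have ht : t.length < (a :: t).length := by simp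
          rw [if_neg hc, pvAInner_stable (a :: t) d t.length ht]
          have hih := ih (by simp)
          simp only [List.length_cons, Nat.add_sub_cancel] at hih
          rw [hih]
          by_cases hs : d = 'S' <;> simp [hc, hs]

theorem pv_main :
    ∀ l : List Char, 'S' ∈ l →
      pvAOuter l (l.length - 1) = ((pvAltGo 0 (0, none) l).2).getD 0 := by
  intro l
  induction l using List.reverseRecOn with
  | nil => intro h; simp at h
  | append_singleton m c ih =>
      intro hS
      rw [pvAltGo_append]
      by_cases hc : c = 'S'
      · subst hc
        rcases m with _ | ⟨a, t⟩
        · simp [pvAOuter, pvAInner, pvAltGo]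
        · have hlen : ((a :: t) ++ ['S']).length - 1 = t.length + 1 := by simp
          rw [hlen]
          have hget := pv_getD_last (a :: t) 'S'
          simp only [List.length_cons] at hget
          simp only [pvAOuter, hget, pvAInner,
            if_neg (show ¬ ('S' : Char) = 'C' by decide)]
          have ht : t.length < (a :: t).length := by simp
          rw [pvAInner_stable (a :: t) 'S' t.length ht]
          have hbs := pvAInner_bs (a :: t) (by simp)
          simp only [List.length_cons, Nat.add_sub_cancel] at hbs
          rw [hbs]
          simp
      · have hSm : 'S' ∈ m := by
          rcases List.mem_append.1 hS with h | h
          · exact h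
          · simp at h; exact absurd h.symm hc
        have hm : m ≠ [] := by rintro rfl; simp at hSm
        rcases m with _ | ⟨a, t⟩
        · exact absurd rfl hm
        · have hlen : ((a :: t) ++ [c]).length - 1 = t.length + 1 := by simp
          rw [hlen]
          have hget := pv_getD_last (a :: t) c
          simp only [List.length_cons] at hget
          simp only [pvAOuter, hget, if_neg hc]
          have ht : t.length < (a :: t).length := by simp
          rw [pvAOuter_stable (a :: t) c t.length ht]
          have hih := ih hSm
          simp only [List.length_cons, Nat.add_sub_cancel] at hih
          rw [hih]
          by_cases hcC : c = 'C' <;> simp [hcC]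

-- ===== VERDICT (by name: the statement is the Claim_ definition above) =====
theorem get_last_S_block_idx_spec : Claim_equal_get_last_S_block_idx := by
  intro prog _ hpre
  unfold Spec_get_last_S_block_idx get_last_S_block_idx get_last_S_block_idx_alt
  have hmem : 'S' ∈ prog.toList := hpre
  have hcnt : prog.toList.count 'S' ≠ 0 := by
    simpa [Nat.pos_iff_ne_zero] using List.count_pos_iff.2 hmem
  simp only [if_neg hcnt]
  exact pv_main prog.toList hmem
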